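-- pv_equiv track=rewrite | github.com/Ace1928/eidosian_forge | archive_forge/src/archive_forge/func_calculate_total_neurons.py | calculate_total_neurons
-- ===== SOURCE A (Python) =====
-- def calculate_total_neurons(N, W):
--     """
--     Calculates the total number of neurons in a layered neural network.
--
--     Parameters:
--     N (int): Number of layers in the network.
--     W (int): Width of each layer.
--
--     Returns:
--     int: Total number of neurons in the network.
--     """
--     if not isinstance(N, int) or N <= 0:
--         raise ValueError('N must be a positive integer')
--     if not isinstance(W, int) or W <= 0:
--         raise ValueError('W must be a positive integer')
--     neurons_base_layer = W * 7 * 6 ** (N - 1)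
--     neurons_above_base = W * sum((6 ** (N - i) for i in range(2, N + 1)))
--     total_neurons = neurons_base_layer + neurons_above_base
--     return total_neurons
-- ===== SOURCE B (Python) =====
-- def calculate_total_neurons(N, W):
--     """Closed-form: total = W*(7*6**(N-1) + (6**(N-1)-1)//5), exact integer arithmetic."""
--     if not isinstance(N, int) or N <= 0:
--         raise ValueError('N must be a positive integer')
--     if not isinstance(W, int) or W <= 0:
--         raise ValueError('W must be a positive integer')
--     p = 6 ** (N - 1)
--     return W * (7 * p + (p - 1) // 5)
-- ===== Notes on version B (the rewrite author's own statement) =====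
-- stated objective: faster
-- what changed: Replaces the O(N)-term generator-sum over the layers with the closed-form geometric series (6^(N-1)-1)//5, so B does a constant number of big-int operations (one exponentiation) instead of N exponentiations and a sum.
import Mathlib
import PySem

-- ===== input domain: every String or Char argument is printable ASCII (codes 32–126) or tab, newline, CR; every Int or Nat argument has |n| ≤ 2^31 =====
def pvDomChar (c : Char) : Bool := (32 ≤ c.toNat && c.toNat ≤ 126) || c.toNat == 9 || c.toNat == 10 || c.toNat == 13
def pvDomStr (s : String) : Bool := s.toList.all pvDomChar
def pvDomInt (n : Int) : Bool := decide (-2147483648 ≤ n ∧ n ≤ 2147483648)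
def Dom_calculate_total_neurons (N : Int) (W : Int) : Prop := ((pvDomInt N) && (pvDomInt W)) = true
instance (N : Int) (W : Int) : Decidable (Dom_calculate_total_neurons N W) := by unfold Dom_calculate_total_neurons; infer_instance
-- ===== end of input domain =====

-- B replaces A's per-layer sum by the closed-form geometric series (6^(N-1)-1)//5 (objective: faster).

-- ===== PORT A =====
-- literal transliteration: the sum() over the generator is a fold over range(2, N+1)
def calculate_total_neurons (N : Int) (W : Int) : Int :=
  let neurons_base_layer := W * 7 * 6 ^ (N - 1).toNat
  let neurons_above_base :=
    W * ((PySem.List.pyRange 2 (N + 1) 1).foldl (fun s i => s + 6 ^ (N - i).toNat) 0)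
  neurons_base_layer + neurons_above_base

-- ===== PORT B =====
def calculate_total_neurons_alt (N : Int) (W : Int) : Int :=
  let p := (6 : Int) ^ (N - 1).toNat
  W * (7 * p + PySem.Int.floordiv (p - 1) 5)

-- ===== PRECONDITION & SPEC =====
-- A raises ValueError unless N ≥ 1 and W ≥ 1 (so does B)
def Pre_calculate_total_neurons (N : Int) (W : Int) : Prop := 1 ≤ N ∧ 1 ≤ W
instance (N : Int) (W : Int) : Decidable (Pre_calculate_total_neurons N W) := by unfold Pre_calculate_total_neurons; infer_instance
def pvWitness_calculate_total_neurons : Int × Int := (3, 2)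

def Spec_calculate_total_neurons (N : Int) (W : Int) (out : Int) : Prop := out = calculate_total_neurons_alt N W
instance (N : Int) (W : Int) (out : Int) : Decidable (Spec_calculate_total_neurons N W out) := by unfold Spec_calculate_total_neurons; infer_instance

-- ===== CLAIM (what is proved, stated in full; the proofs are below) =====
def Claim_equal_calculate_total_neurons : Prop := ∀ (N : Int) (W : Int), Dom_calculate_total_neurons N W → Pre_calculate_total_neurons N W → Spec_calculate_total_neurons N W (calculate_total_neurons N W)

-- ===== LEMMAS AND PROOFS =====

-- the fold of A's generator sum, as a mapped list sum
theorem pvFoldl_sum (l : List Int) (f : Int → Int) (a : Int) :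
    l.foldl (fun s i => s + f i) a = a + (l.map f).sum := by
  induction l generalizing a with
  | nil => simp
  | cons x xs ih => simp [List.foldl_cons, ih (a + f x)]; ring

-- five times A's geometric sum telescopes to 6^(N-1) - 1
theorem pvFive_mul_sum (N : Int) (h : 1 ≤ N) :
    5 * (((PySem.List.pyRange 2 (N + 1) 1).map (fun i => (6 : Int) ^ (N - i).toNat)).sum)
      = 6 ^ (N - 1).toNat - 1 := by
  obtain ⟨n, hn⟩ : ∃ n : Nat, N = (n : Int) + 1 := ⟨(N - 1).toNat, by omega⟩
  subst hn
  rw [PySem.List.pyRange_one]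
  have hnn : (((n : Int) + 1 + 1) - 2).toNat = n := by omega
  rw [hnn, List.map_map]
  have hterm : ∀ k ∈ List.range n,
      ((fun i => (6 : Int) ^ (((n : Int) + 1) - i).toNat) ∘ fun k : Nat => (2 : Int) + k) k
        = (6 : Int) ^ (n - 1 - k) := by
    intro k hk
    simp only [Function.comp, List.mem_range] at *
    congr 1
    omega
  rw [List.map_congr_left hterm]
  have hsum : ((List.range n).map (fun k => (6 : Int) ^ (n - 1 - k))).sum
      = ∑ k ∈ Finset.range n, (6 : Int) ^ (n - 1 - k) := rfl
  rw [hsum, Finset.sum_range_reflect (fun k => (6 : Int) ^ k) n]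
  have hN : (((n : Int) + 1) - 1).toNat = n := by omega
  rw [hN]
  linarith [geom_sum_mul (6 : Int) n]

-- ===== VERDICT (by name: the statement is the Claim_ definition above) =====
theorem calculate_total_neurons_spec : Claim_equal_calculate_total_neurons := by
  intro N W _ hpre
  obtain ⟨hN, _⟩ := hpre
  unfold Spec_calculate_total_neurons calculate_total_neurons calculate_total_neurons_alt
  simp only
  rw [pvFoldl_sum]
  set S := ((PySem.List.pyRange 2 (N + 1) 1).map (fun i => (6 : Int) ^ (N - i).toNat)).sum with hS
  have h5 : 5 * S = 6 ^ (N - 1).toNat - 1 := pvFive_mul_sum N hN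
  rw [PySem.Int.floordiv_eq_ediv_of_pos (by norm_num)]
  have hdiv : (6 ^ (N - 1).toNat - 1) / 5 = S := by
    rw [← h5]; exact Int.mul_ediv_cancel_left S (by norm_num)
  rw [hdiv]; ring
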